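-- pv_equiv track=rewrite | github.com/PeterChauYEG/vdb-mcp | scripts/indexer/chunker.py | _get_overlap_lines
-- ===== SOURCE A (Python) =====
-- from typing import List, Tuple, Dict
--
-- def _get_overlap_lines(current_chunk: List[str], overlap: int) -> List[str]:
--     """Extract overlap lines from end of current chunk."""
--     overlap_lines = []
--     overlap_size = 0
--
--     for prev_line in reversed(current_chunk):
--         line_size = len(prev_line) + 1
--         if overlap_size + line_size <= overlap:
--             overlap_lines.insert(0, prev_line)
--             overlap_size += line_size
--         else:
--             break
--
--     return overlap_lines
-- ===== SOURCE B (Python) =====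
-- from itertools import accumulate, takewhile
-- from typing import List
--
-- def _get_overlap_lines(current_chunk: List[str], overlap: int) -> List[str]:
--     """Extract overlap lines from end of current chunk."""
--     sizes = [len(line) + 1 for line in reversed(current_chunk)]
--     keep = sum(1 for _ in takewhile(lambda c: c <= overlap, accumulate(sizes)))
--     return current_chunk[len(current_chunk) - keep:] if keep else []
-- ===== Notes on version B (the rewrite author's own statement) =====
-- stated objective: faster
-- what changed: Replaces the incremental reverse loop that builds the result with quadratic insert(0, ...) by a pipeline: per-line byte sizes over the reversed list, itertools.accumulate running sums, takewhile to count how many trailing lines fit, then a single slice of current_chunk.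
import Mathlib
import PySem

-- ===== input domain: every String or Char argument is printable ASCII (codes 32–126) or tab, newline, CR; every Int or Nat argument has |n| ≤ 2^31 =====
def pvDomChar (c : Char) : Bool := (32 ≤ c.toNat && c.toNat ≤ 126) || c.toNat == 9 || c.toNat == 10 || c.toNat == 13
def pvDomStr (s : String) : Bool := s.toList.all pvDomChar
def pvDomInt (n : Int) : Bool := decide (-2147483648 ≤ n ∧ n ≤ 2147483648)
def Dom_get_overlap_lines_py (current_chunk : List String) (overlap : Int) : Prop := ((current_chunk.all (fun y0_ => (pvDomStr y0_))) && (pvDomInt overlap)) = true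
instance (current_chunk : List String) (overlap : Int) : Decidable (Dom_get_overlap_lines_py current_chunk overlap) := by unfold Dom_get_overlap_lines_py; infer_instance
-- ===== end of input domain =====

-- B replaces the incremental reverse loop with insert(0,...) by a sizes/accumulate/takewhile/slice pipeline (objective: alternative decomposition).
-- ===== PORT A =====
-- the 'for prev_line in reversed(current_chunk)' loop with its break, carrying (overlap_lines, overlap_size)
def pvALoop (overlap : Int) : List String → Int → List String → List String
  | [], _, overlap_lines => overlap_lines
  | prev_line :: rest, overlap_size, overlap_lines =>
    let line_size : Int := PySem.Str.len prev_line + 1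
    if overlap_size + line_size ≤ overlap then
      pvALoop overlap rest (overlap_size + line_size) (prev_line :: overlap_lines)
    else overlap_lines

def get_overlap_lines_py (current_chunk : List String) (overlap : Int) : List String :=
  pvALoop overlap current_chunk.reverse 0 []

-- ===== PORT B =====
-- itertools.accumulate of the running sums
def pvAccum (s : Int) : List Int → List Int
  | [] => []
  | x :: xs => (s + x) :: pvAccum (s + x) xs

def get_overlap_lines_py_alt (current_chunk : List String) (overlap : Int) : List String :=
  let sizes := current_chunk.reverse.map (fun line => PySem.Str.len line + 1)
  let keep := ((pvAccum 0 sizes).takeWhile (fun c => decide (c ≤ overlap))).length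
  if keep ≠ 0 then current_chunk.drop (current_chunk.length - keep) else []

-- ===== PRECONDITION & SPEC =====
def Spec_get_overlap_lines_py (current_chunk : List String) (overlap : Int) (out : List String) : Prop := out = get_overlap_lines_py_alt current_chunk overlap
instance (current_chunk : List String) (overlap : Int) (out : List String) : Decidable (Spec_get_overlap_lines_py current_chunk overlap out) := by unfold Spec_get_overlap_lines_py; infer_instance

-- ===== CLAIM (what is proved, stated in full; the proofs are below) =====
def Claim_equal_get_overlap_lines_py : Prop := ∀ (current_chunk : List String) (overlap : Int), Dom_get_overlap_lines_py current_chunk overlap → Spec_get_overlap_lines_py current_chunk overlap (get_overlap_lines_py current_chunk overlap)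

-- ===== LEMMAS AND PROOFS =====

-- ===== VERDICT (by name: the statement is the Claim_ definition above) =====
-- number of leading lines of r the A-loop keeps, starting from accumulated size s
def pvKeep (overlap : Int) : List String → Int → Nat
  | [], _ => 0
  | l :: rest, s =>
    if s + (PySem.Str.len l + 1) ≤ overlap then pvKeep overlap rest (s + (PySem.Str.len l + 1)) + 1
    else 0

theorem pvALoop_eq (overlap : Int) (r : List String) (s : Int) (acc : List String) :
    pvALoop overlap r s acc = (r.take (pvKeep overlap r s)).reverse ++ acc := by
  induction r generalizing s acc with
  | nil => simp [pvALoop, pvKeep]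
  | cons l rest ih =>
    simp only [pvALoop, pvKeep]
    split_ifs with h
    · simp [ih, List.take_succ_cons]
    · simp

theorem pvKeep_eq_takeWhile (overlap : Int) (r : List String) (s : Int) :
    pvKeep overlap r s =
      ((pvAccum s (r.map (fun line => PySem.Str.len line + 1))).takeWhile
        (fun c => decide (c ≤ overlap))).length := by
  induction r generalizing s with
  | nil => simp [pvKeep, pvAccum]
  | cons l rest ih =>
    by_cases h : s + (PySem.Str.len l + 1) ≤ overlap
    · have hd : decide (s + ((l.length : Int) + 1) ≤ overlap) = true :=
        decide_eq_true (by simpa [PySem.Str.len] using h)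
      simp [pvKeep, pvAccum, List.takeWhile, PySem.Str.len, hd, ih]
      simpa [PySem.Str.len] using h
    · have hd : decide (s + ((l.length : Int) + 1) ≤ overlap) = false :=
        decide_eq_false (by simpa [PySem.Str.len] using h)
      simp [pvKeep, pvAccum, List.takeWhile, PySem.Str.len, hd]
      exact not_le.mp (by simpa [PySem.Str.len] using h)

theorem pvSlice (chunk : List String) (k : Nat) :
    (chunk.reverse.take k).reverse = if k ≠ 0 then chunk.drop (chunk.length - k) else [] := by
  by_cases h0 : k = 0
  · simp [h0]
  · rw [if_pos h0, List.take_reverse, List.reverse_reverse]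

theorem get_overlap_lines_py_spec : Claim_equal_get_overlap_lines_py := by
  intro chunk overlap _
  show pvALoop overlap chunk.reverse 0 [] = _
  rw [pvALoop_eq, List.append_nil, pvKeep_eq_takeWhile]
  exact pvSlice chunk _
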